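-- pv_equiv track=rewrite | github.com/dolda2000/ashd | python3/ashd/serve.py | parsehspec
-- ===== SOURCE A (Python) =====
-- def parsehspec(spec):
--     if ":" not in spec:
--         return spec, {}
--     nm, spec = spec.split(":", 1)
--     args = {}
--     while spec:
--         if "," in spec:
--             part, spec = spec.split(",", 1)
--         else:
--             part, spec = spec, None
--         if "=" in part:
--             key, val = part.split("=", 1)
--         else:
--             key, val = part, ""
--         args[key] = val
--     return nm, args
-- ===== SOURCE B (Python) =====
-- def parsehspec(spec):
--     nm, sep, rest = spec.partition(":")
--     if not sep:
--         return spec, {}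
--     parts = rest.split(",")
--     if parts[-1] == "":
--         parts.pop()
--     args = {}
--     for part in parts:
--         key, _, val = part.partition("=")
--         args[key] = val
--     return nm, args
-- ===== Notes on version B (the rewrite author's own statement) =====
-- stated objective: idiomatic
-- what changed: Replaced A's while-loop that repeatedly re-scans and re-splits the remaining string with a single partition(':') plus one split(',') and a for-loop over the parts (dropping the one trailing empty segment, which is how a trailing comma or empty rest behaves).
import Mathlib
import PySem

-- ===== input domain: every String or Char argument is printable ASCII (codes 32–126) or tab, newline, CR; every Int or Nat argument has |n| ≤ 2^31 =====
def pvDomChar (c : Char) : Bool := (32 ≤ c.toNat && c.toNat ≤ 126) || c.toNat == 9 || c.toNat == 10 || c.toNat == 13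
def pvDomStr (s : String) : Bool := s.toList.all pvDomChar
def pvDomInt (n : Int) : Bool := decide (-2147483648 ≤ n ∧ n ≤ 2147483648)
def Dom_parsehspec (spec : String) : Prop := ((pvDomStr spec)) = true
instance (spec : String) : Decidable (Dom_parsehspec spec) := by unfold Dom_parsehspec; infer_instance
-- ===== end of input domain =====

-- B replaces A's while-loop, which re-scans and re-splits the remaining string each pass,
-- with one partition at ':' and a single split on ',' folded into the dict (idiomatic rewrite).


-- ===== PORT A =====
-- A-side helpers: the tuple assignments `part, spec = ...` / `key, val = ...` of A's loop body.
def splitComma1 (s : List Char) : List Char × Option (List Char) :=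
  if PySem.Chars.isIn [','] s then
    match PySem.Chars.splitOnMax s [','] 1 with
    | [p, r] => (p, some r)
    | _ => (s, none)
  else (s, none)

def splitEq1 (part : List Char) : List Char × List Char :=
  if PySem.Chars.isIn ['='] part then
    match PySem.Chars.splitOnMax part ['='] 1 with
    | [k, v] => (k, v)
    | _ => (part, [])
  else (part, [])

-- A's while-loop; `none` models Python's None; the fuel only bounds the strictly
-- shrinking remainder and is never exhausted when started with s.length + 1.
def parsehspecLoop (fuel : Nat) (spec : Option (List Char)) (args : PySem.Dict String String) : PySem.Dict String String :=
  match fuel with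
  | 0 => args
  | fuel + 1 =>
    match spec with
    | none => args
    | some [] => args
    | some s =>
      let pr := splitComma1 s
      let kv := splitEq1 pr.1
      parsehspecLoop fuel pr.2 (args.insert (String.ofList kv.1) (String.ofList kv.2))

-- Python's spec.split(",", 1) / part.split("=", 1) with the separator present always
-- yields exactly two pieces, so the `| _ =>` fallback arms above are unreachable defaults.
def parsehspec (spec : String) : String × (List (String × String)) :=
  if PySem.Str.isIn ":" spec = false then (spec, [])
  else
    match PySem.Chars.splitOnMax spec.toList [':'] 1 with
    | [nm, rest] => (String.ofList nm, (parsehspecLoop (rest.length + 1) (some rest) PySem.Dict.empty).items)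
    | _ => (spec, [])

-- ===== PORT B =====
-- B-side helper: one `part.partition("=")` + dict insert, ported as find + take/drop
-- (exact: split at the FIRST '=', val = "" when '=' is absent).
def insPart (args : PySem.Dict String String) (part : List Char) : PySem.Dict String String :=
  let j := PySem.Chars.find part ['=']
  if j = -1 then args.insert (String.ofList part) (String.ofList [])
  else args.insert (String.ofList (part.take j.toNat)) (String.ofList (part.drop (j.toNat + 1)))

-- spec.partition(":") is ported as find + take/drop (exact: split at the first ':').
def parsehspec_alt (spec : String) : String × (List (String × String)) :=
  let cs := spec.toList
  let i := PySem.Chars.find cs [':']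
  if i = -1 then (spec, [])
  else
    let nm := cs.take i.toNat
    let rest := cs.drop (i.toNat + 1)
    let parts := PySem.Chars.splitOn rest [',']
    let parts := if parts.getLast? = some [] then parts.dropLast else parts
    (String.ofList nm, (parts.foldl insPart PySem.Dict.empty).items)

-- ===== PRECONDITION & SPEC =====
def Spec_parsehspec (spec : String) (out : String × (List (String × String))) : Prop := out = parsehspec_alt spec
instance (spec : String) (out : String × (List (String × String))) : Decidable (Spec_parsehspec spec out) := by unfold Spec_parsehspec; infer_instance

-- ===== CLAIM (what is proved, stated in full; the proofs are below) =====
def Claim_equal_parsehspec : Prop := ∀ (spec : String), Dom_parsehspec spec → Spec_parsehspec spec (parsehspec spec)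

-- ===== LEMMAS AND PROOFS =====

-- reference model: structural single-character split, with closed forms for
-- PySem.Chars.splitOn / splitOnMax / find / isIn on a one-character separator
def splitC (c : Char) : List Char → List (List Char)
  | [] => [[]]
  | x :: xs => if x = c then [] :: splitC c xs else (splitC c xs).modifyHead (x :: ·)

def consH (p : List Char) : List (List Char) → List (List Char)
  | [] => [p]
  | h :: t => (p ++ h) :: t

def dte (L : List (List Char)) : List (List Char) :=
  if L.getLast? = some [] then L.dropLast else L

theorem splitC_ne_nil (c : Char) (s : List Char) : splitC c s ≠ [] := by
  induction s with
  | nil => simp [splitC]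
  | cons x xs ih =>
    simp only [splitC]
    split
    · simp
    · cases h : splitC c xs with
      | nil => exact absurd h ih
      | cons a t => simp

theorem go_eq (c : Char) : ∀ (l : List Char) (fuel : Nat) (cur : List Char) (acc : List (List Char)),
    l.length ≤ fuel →
    PySem.Chars.splitOn.go [c] fuel l cur acc = acc.reverse ++ consH cur.reverse (splitC c l) := by
  intro l
  induction l with
  | nil =>
    intro fuel cur acc _
    cases fuel <;> simp [PySem.Chars.splitOn.go, splitC, consH]
  | cons x xs ih =>
    intro fuel cur acc hf
    cases fuel with
    | zero => simp at hf
    | succ f =>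
      simp only [List.length_cons] at hf
      by_cases hx : x = c
      · subst hx
        rw [PySem.Chars.splitOn.go]
        rw [if_pos (by simp [List.isPrefixOf])]
        simp only [List.length_cons, List.length_nil, List.drop_succ_cons, List.drop_zero]
        rw [ih f [] (cur.reverse :: acc) (by omega)]
        simp only [splitC, List.reverse_cons, List.reverse_nil]
        cases h : splitC x xs with
        | nil => exact absurd h (splitC_ne_nil x xs)
        | cons a t => simp [consH, List.append_assoc]
      · rw [PySem.Chars.splitOn.go]
        rw [if_neg (by simp [List.isPrefixOf]; exact fun h => absurd h.symm hx)]
        rw [ih f (x :: cur) acc (by omega)]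
        congr 1
        simp only [splitC, if_neg hx]
        cases h : splitC c xs with
        | nil => exact absurd h (splitC_ne_nil c xs)
        | cons a t => simp [consH, List.modifyHead, List.reverse_cons, List.append_assoc]

theorem splitOn_eq_splitC (c : Char) (s : List Char) :
    PySem.Chars.splitOn s [c] = splitC c s := by
  unfold PySem.Chars.splitOn
  rw [go_eq c s (s.length + 1) [] [] (by omega)]
  cases h : splitC c s with
  | nil => exact absurd h (splitC_ne_nil c s)
  | cons a t => simp [consH]

theorem mem_cons_eq_of_ne {c x : Char} (hx : ¬ x = c) (xs : List Char) :
    (c ∈ x :: xs) = (c ∈ xs) :=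
  propext ⟨fun h => (List.mem_cons.mp h).resolve_left (fun he => hx he.symm),
    List.mem_cons_of_mem x⟩

theorem prefix_single_false {c x : Char} (hx : ¬ x = c) (xs : List Char) :
    [c].isPrefixOf (x :: xs) = false := by
  simp [List.isPrefixOf]
  exact fun h => absurd h.symm hx

theorem findgo_eq (c : Char) : ∀ (l : List Char) (k : Nat),
    PySem.Chars.find.go [c] l k =
      if c ∈ l then ((k : Int) + (l.takeWhile (fun x => x != c)).length) else -1 := by
  intro l
  induction l with
  | nil => intro k; simp [PySem.Chars.find.go]
  | cons x xs ih =>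
    intro k
    by_cases hx : x = c
    · subst hx
      rw [PySem.Chars.find.go]
      rw [if_pos (by simp [List.isPrefixOf])]
      simp
    · rw [PySem.Chars.find.go]
      rw [if_neg (by simp [prefix_single_false hx])]
      simp only [mem_cons_eq_of_ne hx]
      rw [ih (k + 1)]
      by_cases hc : c ∈ xs
      · rw [if_pos hc, if_pos hc]
        simp [hx]
        ring
      · rw [if_neg hc, if_neg hc]

theorem find_single (c : Char) (s : List Char) :
    PySem.Chars.find s [c] =
      if c ∈ s then ((s.takeWhile (fun x => x != c)).length : Int) else -1 := by
  unfold PySem.Chars.find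
  rw [findgo_eq]
  split <;> simp

theorem isIn_single (c : Char) (s : List Char) :
    PySem.Chars.isIn [c] s = decide (c ∈ s) := by
  unfold PySem.Chars.isIn
  rw [find_single]
  by_cases hc : c ∈ s
  · simp [hc]
  · simp [hc]

theorem goMax0 (c : Char) (fuel : Nat) (l cur : List Char) (acc : List (List Char)) :
    PySem.Chars.splitOnMax.go [c] fuel 0 l cur acc = acc.reverse ++ [cur.reverse ++ l] := by
  cases fuel with
  | zero => simp [PySem.Chars.splitOnMax.go]
  | succ f =>
    cases l with
    | nil => simp [PySem.Chars.splitOnMax.go]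
    | cons x xs => rw [PySem.Chars.splitOnMax.go]; simp

theorem goMax1 (c : Char) : ∀ (l : List Char) (fuel : Nat) (cur : List Char) (acc : List (List Char)),
    l.length ≤ fuel →
    PySem.Chars.splitOnMax.go [c] fuel 1 l cur acc =
      acc.reverse ++ (if c ∈ l then
        [cur.reverse ++ l.takeWhile (fun x => x != c), (l.dropWhile (fun x => x != c)).tail]
      else [cur.reverse ++ l]) := by
  intro l
  induction l with
  | nil =>
    intro fuel cur acc _
    cases fuel <;> simp [PySem.Chars.splitOnMax.go]
  | cons x xs ih =>
    intro fuel cur acc hf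
    cases fuel with
    | zero => simp at hf
    | succ f =>
      simp only [List.length_cons] at hf
      rw [PySem.Chars.splitOnMax.go]
      rw [if_neg (by omega : ¬ (1 : Nat) = 0)]
      by_cases hx : x = c
      · subst hx
        rw [if_pos (by simp [List.isPrefixOf])]
        simp only [List.length_cons, List.length_nil, List.drop_succ_cons, List.drop_zero]
        have h1 : (1 : Nat) - 1 = 0 := rfl
        rw [h1, goMax0]
        rw [if_pos (List.mem_cons_self)]
        simp
      · rw [if_neg (by simp [prefix_single_false hx])]
        rw [ih f (x :: cur) acc (by omega)]
        simp only [mem_cons_eq_of_ne hx]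
        by_cases hc : c ∈ xs
        · rw [if_pos hc, if_pos hc]
          simp [hx, List.reverse_cons, List.append_assoc]
        · rw [if_neg hc, if_neg hc]
          simp [List.reverse_cons, List.append_assoc]

theorem splitOnMax1 (c : Char) (s : List Char) :
    PySem.Chars.splitOnMax s [c] 1 =
      if c ∈ s then [s.takeWhile (fun x => x != c), (s.dropWhile (fun x => x != c)).tail]
      else [s] := by
  unfold PySem.Chars.splitOnMax
  rw [if_neg (by omega : ¬ (1 : Int) < 0)]
  have h1 : (1 : Int).toNat = 1 := rfl
  rw [h1, goMax1 c s (s.length + 1) [] [] (by omega)]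
  split <;> simp

theorem splitC_not_mem {c : Char} {s : List Char} (h : c ∉ s) : splitC c s = [s] := by
  induction s with
  | nil => simp [splitC]
  | cons x xs ih =>
    simp only [List.mem_cons, not_or] at h
    have hx : ¬ x = c := fun he => h.1 he.symm
    simp only [splitC, if_neg hx, ih h.2, List.modifyHead]

theorem splitC_mem {c : Char} {s : List Char} (h : c ∈ s) :
    splitC c s = s.takeWhile (fun x => x != c) :: splitC c ((s.dropWhile (fun x => x != c)).tail) := by
  induction s with
  | nil => simp at h
  | cons x xs ih =>
    by_cases hx : x = c
    · subst hx
      simp [splitC]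
    · have hc : c ∈ xs := (List.mem_cons.mp h).resolve_left (fun he => hx he.symm)
      rw [List.takeWhile_cons, if_pos (by simp [hx]), List.dropWhile_cons, if_pos (by simp [hx])]
      simp only [splitC, if_neg hx, ih hc, List.modifyHead]

theorem ins_eq (args : PySem.Dict String String) (part : List Char) :
    args.insert (String.ofList (splitEq1 part).1) (String.ofList (splitEq1 part).2)
      = insPart args part := by
  by_cases h : '=' ∈ part
  · rw [show splitEq1 part = (part.takeWhile (fun x => x != '='), (part.dropWhile (fun x => x != '=')).tail) from by
      simp only [splitEq1, isIn_single, h, decide_true, if_true, splitOnMax1]]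
    unfold insPart
    rw [find_single, if_pos h]
    have hlen : ((part.takeWhile (fun x => x != '=')).length : Int) ≠ -1 := by omega
    rw [if_neg hlen, Int.toNat_natCast]
    have hsplit : part.takeWhile (fun x => x != '=') ++ part.dropWhile (fun x => x != '=') = part :=
      List.takeWhile_append_dropWhile
    have htake : part.take (part.takeWhile (fun x => x != '=')).length
        = part.takeWhile (fun x => x != '=') :=
      (List.prefix_iff_eq_take.mp (List.takeWhile_prefix _)).symm
    have hdrop : part.drop ((part.takeWhile (fun x => x != '=')).length + 1)
        = (part.dropWhile (fun x => x != '=')).tail := by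
      calc part.drop ((part.takeWhile (fun x => x != '=')).length + 1)
          = (part.drop (part.takeWhile (fun x => x != '=')).length).tail := List.tail_drop.symm
        _ = ((part.takeWhile (fun x => x != '=') ++ part.dropWhile (fun x => x != '=')).drop
              (part.takeWhile (fun x => x != '=')).length).tail := by rw [hsplit]
        _ = (part.dropWhile (fun x => x != '=')).tail := by rw [List.drop_left]
    rw [htake, hdrop]
  · rw [show splitEq1 part = (part, []) from by
      simp only [splitEq1, isIn_single, h, decide_false, Bool.false_eq_true, if_false]]
    unfold insPart
    rw [find_single, if_neg h, if_pos rfl]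

theorem splitComma1_mem {s : List Char} (h : ',' ∈ s) :
    splitComma1 s = (s.takeWhile (fun x => x != ','), some ((s.dropWhile (fun x => x != ',')).tail)) := by
  simp only [splitComma1, isIn_single, h, decide_true, if_true, splitOnMax1]

theorem splitComma1_not_mem {s : List Char} (h : ',' ∉ s) :
    splitComma1 s = (s, none) := by
  simp only [splitComma1, isIn_single, h, decide_false, Bool.false_eq_true, if_false]

theorem dte_cons (p : List Char) {L : List (List Char)} (h : L ≠ []) :
    dte (p :: L) = p :: dte L := by
  cases L with
  | nil => exact absurd rfl h
  | cons q t =>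
    unfold dte
    rw [List.getLast?_cons_cons]
    split <;> simp

theorem loop_eq : ∀ (fuel : Nat) (s : List Char) (args : PySem.Dict String String),
    s.length < fuel →
    parsehspecLoop fuel (some s) args = (dte (splitC ',' s)).foldl insPart args := by
  intro fuel
  induction fuel with
  | zero => intro s args h; omega
  | succ f ih =>
    intro s args hf
    cases s with
    | nil => simp [parsehspecLoop, splitC, dte]
    | cons x xs =>
      rw [show parsehspecLoop (f + 1) (some (x :: xs)) args
          = parsehspecLoop f (splitComma1 (x :: xs)).2
              (args.insert (String.ofList (splitEq1 (splitComma1 (x :: xs)).1).1)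
                (String.ofList (splitEq1 (splitComma1 (x :: xs)).1).2)) from rfl]
      by_cases hc : ',' ∈ x :: xs
      · rw [splitComma1_mem hc]
        simp only
        rw [ins_eq, ih _ _ (by
          have h1 : ((x :: xs).dropWhile (fun y => y != ',')).length ≤ (x :: xs).length :=
            List.length_dropWhile_le _ _
          have h2 : ((x :: xs).dropWhile (fun y => y != ',')) ≠ [] := by
            intro hnil
            have hall := List.takeWhile_append_dropWhile (p := fun y => y != ',') (l := x :: xs)
            rw [hnil, List.append_nil] at hall
            have hmem := List.mem_takeWhile_imp (l := x :: xs) (p := fun y => y != ',') (hall ▸ hc)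
            simp at hmem
          have h3 : 0 < ((x :: xs).dropWhile (fun y => y != ',')).length :=
            List.length_pos_of_ne_nil h2
          simp only [List.length_tail, List.length_cons] at *
          omega)]
        rw [splitC_mem hc, dte_cons _ (splitC_ne_nil _ _), List.foldl_cons]
      · rw [splitComma1_not_mem hc]
        simp only
        rw [ins_eq]
        have hstop : ∀ d, parsehspecLoop f none d = d := by
          intro d; cases f <;> simp [parsehspecLoop]
        rw [hstop, splitC_not_mem hc]
        have hd : dte [x :: xs] = [x :: xs] := by unfold dte; simp
        rw [hd, List.foldl_cons, List.foldl_nil]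

theorem parsehspec_eq_alt (spec : String) : parsehspec spec = parsehspec_alt spec := by
  unfold parsehspec parsehspec_alt
  by_cases h : ':' ∈ spec.toList
  · have hiI : PySem.Str.isIn ":" spec = true := by
      rw [PySem.Str.isIn_eq, show (":" : String).toList = [':'] from rfl, isIn_single]
      simp [h]
    rw [hiI]
    simp only [Bool.true_eq_false, if_false]
    rw [splitOnMax1, if_pos h]
    simp only [find_single, if_pos h]
    have hlen : ((spec.toList.takeWhile (fun x => x != ':')).length : Int) ≠ -1 := by omega
    rw [if_neg hlen, Int.toNat_natCast]
    have hsplit : spec.toList.takeWhile (fun x => x != ':') ++ spec.toList.dropWhile (fun x => x != ':') = spec.toList :=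
      List.takeWhile_append_dropWhile
    have htake : spec.toList.take (spec.toList.takeWhile (fun x => x != ':')).length
        = spec.toList.takeWhile (fun x => x != ':') :=
      (List.prefix_iff_eq_take.mp (List.takeWhile_prefix _)).symm
    have hdrop : spec.toList.drop ((spec.toList.takeWhile (fun x => x != ':')).length + 1)
        = (spec.toList.dropWhile (fun x => x != ':')).tail := by
      calc spec.toList.drop ((spec.toList.takeWhile (fun x => x != ':')).length + 1)
          = (spec.toList.drop (spec.toList.takeWhile (fun x => x != ':')).length).tail := List.tail_drop.symm
        _ = ((spec.toList.takeWhile (fun x => x != ':') ++ spec.toList.dropWhile (fun x => x != ':')).drop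
              (spec.toList.takeWhile (fun x => x != ':')).length).tail := by rw [hsplit]
        _ = (spec.toList.dropWhile (fun x => x != ':')).tail := by rw [List.drop_left]
    rw [htake, hdrop]
    rw [loop_eq _ _ _ (by omega)]
    rw [splitOn_eq_splitC]
    rfl
  · have hiI : PySem.Str.isIn ":" spec = false := by
      rw [PySem.Str.isIn_eq, show (":" : String).toList = [':'] from rfl, isIn_single]
      simp [h]
    rw [hiI, if_pos rfl]
    simp [find_single, h]

-- ===== VERDICT (by name: the statement is the Claim_ definition above) =====
theorem parsehspec_spec : Claim_equal_parsehspec := by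
  intro spec _
  unfold Spec_parsehspec
  exact parsehspec_eq_alt spec
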